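-- pv_equiv track=rewrite | github.com/ishaanshekhawat/PythonPractice | Video Ads Insertion.py | can_insert_ads
-- ===== SOURCE A (Python) =====
-- def can_insert_ads(feed_items, n):
--     # Count of how many video ads we can insert
--     ct = 0
--
--     # Iterate through the feed to find consecutive normal posts (0, 0)
--     # Each such pair gives one possible insertion spot between them.
--     for i in range(len(feed_items) - 1):
--         # If two adjacent items are both normal posts,
--         # we can insert a video ad between them.
--         if feed_items[i] == 0 and feed_items[i + 1] == 0:
--             ct += 1
--
--     # If the first item is a normal post (0),
--     # we can also consider placing a video ad before it (at the start of the feed).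
--     if feed_items[0] == 0:
--         ct += 1
--
--     # If the last item is a normal post (0),
--     # we can consider placing a video ad after it (at the end of the feed).
--     if feed_items[-1] == 0:
--         ct += 1
--
--     # If the number of possible placements is at least `n`,
--     # then it's possible to insert all the requested video ads.
--     if ct >= n:
--         return True
--
--     # Otherwise, not enough valid slots are available.
--     return False
-- ===== SOURCE B (Python) =====
-- def can_insert_ads(feed_items, n):
--     # Run-length decomposition: a maximal run of L zeros contributes L-1
--     # interior adjacent (0,0) slots; boundary slots are added separately.
--     ct = 0
--     run = 0
--     for x in feed_items:
--         if x == 0: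
--             run += 1
--         else:
--             if run > 0:
--                 ct += run - 1
--             run = 0
--     if run > 0:
--         ct += run - 1
--     if feed_items[0] == 0:
--         ct += 1
--     if feed_items[-1] == 0:
--         ct += 1
--     return ct >= n
-- ===== Notes on version B (the rewrite author's own statement) =====
-- stated objective: alternative
-- what changed: Replaces the index-based scan over adjacent pairs feed[i],feed[i+1] with a single value-based pass maintaining the current zero-run length, adding run-1 per maximal run of zeros (its interior adjacent pairs), then the same boundary checks.
import Mathlib
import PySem

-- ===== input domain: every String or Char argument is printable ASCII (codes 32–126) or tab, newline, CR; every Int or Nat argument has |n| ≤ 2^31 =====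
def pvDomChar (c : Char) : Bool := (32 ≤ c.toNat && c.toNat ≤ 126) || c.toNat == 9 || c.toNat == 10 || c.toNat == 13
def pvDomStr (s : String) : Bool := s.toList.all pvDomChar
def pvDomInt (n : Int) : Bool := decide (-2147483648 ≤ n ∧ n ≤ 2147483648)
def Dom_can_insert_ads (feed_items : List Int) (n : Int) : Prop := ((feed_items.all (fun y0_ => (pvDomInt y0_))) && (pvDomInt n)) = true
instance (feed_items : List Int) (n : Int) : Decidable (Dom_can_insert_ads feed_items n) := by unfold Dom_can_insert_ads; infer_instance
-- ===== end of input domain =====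

-- B replaces the adjacent-pair index scan with a single value pass maintaining the
-- current zero-run length (each maximal run of L zeros contributes L-1 slots); same cost.

-- ===== PORT A =====
-- literal port of A: scan indices 0..len-2, count adjacent (0,0) pairs, then boundary checks.
-- feed_items[0] / feed_items[-1] are PySem.List.pyGetD with an unreachable default (Pre_ excludes []).
def can_insert_ads (feed_items : List Int) (n : Int) : Bool :=
  let ct : Int := (PySem.List.pyRange 0 ((feed_items.length : Int) - 1) 1).foldl
    (fun ct i =>
      if PySem.List.pyGetD feed_items i 1 = 0 ∧ PySem.List.pyGetD feed_items (i + 1) 1 = 0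
      then ct + 1 else ct) 0
  let ct := if PySem.List.pyGetD feed_items 0 1 = 0 then ct + 1 else ct
  let ct := if PySem.List.pyGetD feed_items (-1) 1 = 0 then ct + 1 else ct
  if ct ≥ n then true else false

-- ===== PORT B =====
-- literal port of Source B: one fold over the values carrying (ct, run); flush the last run;
-- then the same two boundary checks and the comparison.
def can_insert_ads_alt (feed_items : List Int) (n : Int) : Bool :=
  let p : Int × Int := feed_items.foldl
    (fun s x =>
      if x = 0 then (s.1, s.2 + 1)
      else (if s.2 > 0 then s.1 + s.2 - 1 else s.1, 0)) (0, 0)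
  let ct := if p.2 > 0 then p.1 + p.2 - 1 else p.1
  let ct := if PySem.List.pyGetD feed_items 0 1 = 0 then ct + 1 else ct
  let ct := if PySem.List.pyGetD feed_items (-1) 1 = 0 then ct + 1 else ct
  decide (ct ≥ n)

-- ===== PRECONDITION & SPEC =====
-- Pre_ excludes only the empty feed, on which Python A raises IndexError at feed_items[0]
-- (B raises there too).
def Pre_can_insert_ads (feed_items : List Int) (n : Int) : Prop := feed_items ≠ []
instance (feed_items : List Int) (n : Int) : Decidable (Pre_can_insert_ads feed_items n) := by
  unfold Pre_can_insert_ads; infer_instance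

def pvWitness_can_insert_ads : List Int × Int := ([0, 1, 0, 0], 3)

def Spec_can_insert_ads (feed_items : List Int) (n : Int) (out : Bool) : Prop := out = can_insert_ads_alt feed_items n
instance (feed_items : List Int) (n : Int) (out : Bool) : Decidable (Spec_can_insert_ads feed_items n out) := by unfold Spec_can_insert_ads; infer_instance

-- ===== CLAIM (what is proved, stated in full; the proofs are below) =====
def Claim_equal_can_insert_ads : Prop := ∀ (feed_items : List Int) (n : Int), Dom_can_insert_ads feed_items n → Pre_can_insert_ads feed_items n → Spec_can_insert_ads feed_items n (can_insert_ads feed_items n)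

-- ===== LEMMAS AND PROOFS =====

-- number of adjacent (0,0) pairs, structurally
def pvPairCount : List Int → Int
  | x :: y :: rest => (if x = 0 ∧ y = 0 then 1 else 0) + pvPairCount (y :: rest)
  | _ => 0

theorem pvPairCount_cons_ne (x : Int) (xs : List Int) (hx : x ≠ 0) :
    pvPairCount (x :: xs) = pvPairCount xs := by
  cases xs with
  | nil => rfl
  | cons y rest => simp [pvPairCount, hx]

-- index shift: the pair scan over indices 1..m-1 of x::tl is the pair scan over 0..m-2 of tl
theorem pvShift (x : Int) (tl : List Int) (c : Int) :
    (PySem.List.pyRange 1 ((tl.length : Int)) 1).foldl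
      (fun ct i =>
        if PySem.List.pyGetD (x :: tl) i 1 = 0 ∧ PySem.List.pyGetD (x :: tl) (i + 1) 1 = 0
        then ct + 1 else ct) c
    = (PySem.List.pyRange 0 ((tl.length : Int) - 1) 1).foldl
      (fun ct i =>
        if PySem.List.pyGetD tl i 1 = 0 ∧ PySem.List.pyGetD tl (i + 1) 1 = 0
        then ct + 1 else ct) c := by
  rw [PySem.List.pyRange_one, PySem.List.pyRange_one]
  simp only [List.foldl_map]
  have h1 : ((tl.length : Int) - 1).toNat = tl.length - 1 := by omega
  have h2 : ((tl.length : Int) - 1 - 0).toNat = tl.length - 1 := by omega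
  rw [h1, h2]
  congr 1
  funext ct k
  have e1 : (1 : Int) + (k : Int) = ((k + 1 : Nat) : Int) := by push_cast; ring
  have e2 : (1 : Int) + (k : Int) + 1 = ((k + 2 : Nat) : Int) := by push_cast; ring
  have e3 : (0 : Int) + (k : Int) = ((k : Nat) : Int) := by ring
  have e4 : (0 : Int) + (k : Int) + 1 = ((k + 1 : Nat) : Int) := by push_cast; ring
  rw [e2, e1, e4, e3]
  simp only [PySem.List.pyGetD_natCast]
  simp

-- A's index fold computes pvPairCount
theorem pvCountA : ∀ (xs : List Int) (c : Int),
    (PySem.List.pyRange 0 ((xs.length : Int) - 1) 1).foldl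
      (fun ct i =>
        if PySem.List.pyGetD xs i 1 = 0 ∧ PySem.List.pyGetD xs (i + 1) 1 = 0
        then ct + 1 else ct) c = c + pvPairCount xs
  | [], c => by simp [PySem.List.pyRange_one_eq_nil, pvPairCount]
  | [x], c => by simp [PySem.List.pyRange_one_eq_nil, pvPairCount]
  | x :: y :: rest, c => by
    have hlt : (0 : Int) < ((x :: y :: rest).length : Int) - 1 := by
      simp only [List.length_cons]; push_cast; omega
    rw [PySem.List.pyRange_one_cons hlt]
    simp only [List.foldl_cons, zero_add]
    have hb : ((x :: y :: rest).length : Int) - 1 = (((y :: rest).length : Int)) := by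
      simp
    rw [hb, pvShift x (y :: rest), pvCountA (y :: rest)]
    have hget0 : PySem.List.pyGetD (x :: y :: rest) 0 1 = x := by
      simp [PySem.List.pyGetD]
    have hget1 : PySem.List.pyGetD (x :: y :: rest) 1 1 = y := by
      simp [PySem.List.pyGetD]
    rw [hget0, hget1]
    simp only [pvPairCount]
    split <;> ring

-- B's fold invariant: carrying (ct, run) and flushing equals ct plus the pair count
theorem pvCountB : ∀ (xs : List Int) (ct run : Int), 0 ≤ run →
    (let p := xs.foldl
        (fun s x =>
          if x = 0 then (s.1, s.2 + 1)
          else (if s.2 > 0 then s.1 + s.2 - 1 else s.1, 0)) (ct, run)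
     if p.2 > 0 then p.1 + p.2 - 1 else p.1)
    = ct + (if run > 0 then run - 1 + pvPairCount (0 :: xs) else pvPairCount xs)
  | [], ct, run, h => by
    simp only [List.foldl_nil, pvPairCount]
    split <;> ring
  | x :: xs, ct, run, h => by
    simp only [List.foldl_cons]
    by_cases hx : x = 0
    · subst hx
      rw [if_pos rfl]
      have IH := pvCountB xs ct (run + 1) (by omega)
      simp only at IH
      rw [IH, if_pos (by omega : run + 1 > 0)]
      by_cases hr : run > 0
      · rw [if_pos hr]
        have h00 : pvPairCount (0 :: 0 :: xs) = 1 + pvPairCount (0 :: xs) := by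
          simp [pvPairCount]
        rw [h00]; ring
      · rw [if_neg hr]
        have h0 : run = 0 := by omega
        subst h0; ring
    · rw [if_neg hx]
      have IH := pvCountB xs (if run > 0 then ct + run - 1 else ct) 0 le_rfl
      simp only at IH
      rw [IH, if_neg (by omega : ¬ (0 : Int) > 0)]
      by_cases hr : run > 0
      · rw [if_pos hr, if_pos hr]
        have h0x : pvPairCount (0 :: x :: xs) = pvPairCount (x :: xs) := by
          simp [pvPairCount, hx]
        rw [h0x, pvPairCount_cons_ne x xs hx]; ring
      · rw [if_neg hr, if_neg hr, pvPairCount_cons_ne x xs hx]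

-- ===== VERDICT (by name: the statement is the Claim_ definition above) =====
theorem can_insert_ads_spec : Claim_equal_can_insert_ads := by
  intro feed_items n _ _
  unfold Spec_can_insert_ads can_insert_ads can_insert_ads_alt
  simp only
  rw [pvCountA feed_items 0]
  have hB := pvCountB feed_items 0 0 le_rfl
  simp only at hB
  rw [hB]
  simp only [zero_add, if_neg (by omega : ¬ (0 : Int) > 0)]
  split <;> split <;> split <;> simp_all
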